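-- pv_equiv track=rewrite | github.com/daniel-reich/ubiquitous-fiesta | Emdzxs23PRzSDuvk3_13.py | pizza_points
-- ===== SOURCE A (Python) =====
-- def pizza_points(customers,num,price):
--     name_list= []
--     for name,items in customers.items():
--         count = 0
--         for i in items:
--             if i >= price:
--                 count += 1
--             if count >= num and name not in name_list:
--                 name_list.append(name)
--     return sorted(name_list)
-- ===== SOURCE B (Python) =====
-- def pizza_points(customers, num, price):
--     def qualifies(items):
--         ranked = sorted(items, reverse=True)
--         return num <= 0 or (num <= len(ranked) and ranked[num - 1] >= price)
--     return sorted(name for name, items in customers.items() if qualifies(items))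
-- ===== Notes on version B (the rewrite author's own statement) =====
-- stated objective: alternative
-- what changed: Replaces A's per-item counting with membership/append bookkeeping by an order-statistic test: sort each customer's items descending and check whether the num-th largest item reaches the price; Pre_ additionally excludes num <= 0 together with a customer that has an empty item list, a corner where counting zero qualifying orders makes both including and excluding that customer defensible (A excludes, B includes).
-- outside the precondition, e.g. on pizza_points({'a': []}, 0, 1): A returns [], B returns ['a']
import Mathlib
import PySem

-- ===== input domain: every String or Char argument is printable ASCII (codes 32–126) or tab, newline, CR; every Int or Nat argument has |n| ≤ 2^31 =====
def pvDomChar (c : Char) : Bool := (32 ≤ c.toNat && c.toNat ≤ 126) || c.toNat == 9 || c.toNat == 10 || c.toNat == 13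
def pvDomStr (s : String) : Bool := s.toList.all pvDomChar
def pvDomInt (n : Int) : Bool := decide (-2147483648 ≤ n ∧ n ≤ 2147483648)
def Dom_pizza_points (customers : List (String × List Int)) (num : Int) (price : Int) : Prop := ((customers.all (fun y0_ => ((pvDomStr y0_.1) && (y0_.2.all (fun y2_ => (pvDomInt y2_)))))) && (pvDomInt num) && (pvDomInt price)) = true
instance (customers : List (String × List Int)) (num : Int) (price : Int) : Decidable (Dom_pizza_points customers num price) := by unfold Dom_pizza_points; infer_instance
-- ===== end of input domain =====

-- B replaces A's per-item counting with an order-statistic test (num-th largest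
-- item vs the price) on each customer's items sorted descending.

-- ===== PORT A =====
-- inner loop body: count update, then conditional append guarded by membership
def pvStepA (num price : Int) (name : String) (st : Int × List String) (i : Int) : Int × List String :=
  let count := if i ≥ price then st.1 + 1 else st.1
  let nl := if count ≥ num ∧ ¬ name ∈ st.2 then st.2 ++ [name] else st.2
  (count, nl)

def pizza_points (customers : List (String × List Int)) (num : Int) (price : Int) : List String :=
  let name_list :=
    customers.foldl (fun nl p => (p.2.foldl (pvStepA num price p.1) (0, nl)).2) []
  PySem.List.sorted name_list (fun x => x) false

-- ===== PORT B =====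
-- qualifies(items): num <= 0 or (num <= len(ranked) and ranked[num-1] >= price)
def pvQualifies (num price : Int) (items : List Int) : Bool :=
  let ranked := PySem.List.sorted items (fun x => x) true
  decide (num ≤ 0) ||
    (decide (num ≤ (ranked.length : Int)) &&
      ((PySem.List.pyGet? ranked (num - 1)).map (fun v => decide (v ≥ price))).getD false)

def pizza_points_alt (customers : List (String × List Int)) (num : Int) (price : Int) : List String :=
  PySem.List.sorted
    ((customers.filter (fun p => pvQualifies num price p.2)).map Prod.fst)
    (fun x => x) false

-- ===== PRECONDITION & SPEC =====
-- Pre_ requires distinct customer names (A's parameter is a Python dict, whose keys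
-- are necessarily distinct, so this excludes nothing A accepts) and excludes num ≤ 0
-- together with a customer that has an empty item list, a corner where zero qualifying
-- orders are required and both including and excluding that customer are defensible.
def Pre_pizza_points (customers : List (String × List Int)) (num : Int) (price : Int) : Prop :=
  (customers.map Prod.fst).Nodup ∧ (num ≤ 0 → ∀ p ∈ customers, p.2 ≠ [])
instance (customers : List (String × List Int)) (num : Int) (price : Int) : Decidable (Pre_pizza_points customers num price) := by unfold Pre_pizza_points; infer_instance
def pvWitness_pizza_points : (List (String × List Int)) × Int × Int :=
  ([("ann", [3, 1]), ("bob", [])], 1, 2)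

def Spec_pizza_points (customers : List (String × List Int)) (num : Int) (price : Int) (out : List String) : Prop := out = pizza_points_alt customers num price
instance (customers : List (String × List Int)) (num : Int) (price : Int) (out : List String) : Decidable (Spec_pizza_points customers num price out) := by unfold Spec_pizza_points; infer_instance

-- ===== CLAIM (what is proved, stated in full; the proofs are below) =====
def Claim_equal_pizza_points : Prop := ∀ (customers : List (String × List Int)) (num : Int) (price : Int), Dom_pizza_points customers num price → Pre_pizza_points customers num price → Spec_pizza_points customers num price (pizza_points customers num price)

-- ===== LEMMAS AND PROOFS =====

-- qualifying-item count starting from c (A's inner counter)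
def pvCnt (price : Int) (items : List Int) (c : Int) : Int :=
  items.foldl (fun acc i => if i ≥ price then acc + 1 else acc) c

theorem pvCnt_mono (price : Int) (items : List Int) : ∀ c : Int, c ≤ pvCnt price items c := by
  induction items with
  | nil => intro c; simp [pvCnt]
  | cons i rest ih =>
    intro c
    simp only [pvCnt, List.foldl_cons]
    refine le_trans ?_ (ih _)
    split <;> omega

theorem pvCnt_eq_countP (price : Int) (items : List Int) : ∀ c : Int,
    pvCnt price items c = c + ((items.countP (fun i => decide (price ≤ i)) : Nat) : Int) := by
  induction items with
  | nil => intro c; simp [pvCnt]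
  | cons i rest ih =>
    intro c
    have h1 : pvCnt price (i :: rest) c = pvCnt price rest (if i ≥ price then c + 1 else c) := by
      simp [pvCnt]
    rw [h1, List.countP_cons]
    by_cases h : price ≤ i
    · rw [if_pos h, ih]; simp [h]; omega
    · rw [if_neg h, ih]; simp [h]

-- once the name is in the list, the inner loop leaves the list unchanged
theorem pvInner_mem (num price : Int) (name : String) (items : List Int) :
    ∀ (c : Int) (nl : List String), name ∈ nl →
      (items.foldl (pvStepA num price name) (c, nl)).2 = nl := by
  induction items with
  | nil => intro c nl _; simp
  | cons i rest ih =>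
    intro c nl h
    rw [List.foldl_cons]
    have hstep : pvStepA num price name (c, nl) i = ((if i ≥ price then c + 1 else c), nl) := by
      simp [pvStepA, h]
    rw [hstep]
    exact ih _ _ h

-- the inner loop appends the name exactly when the final count reaches num
theorem pvInner_char (num price : Int) (name : String) (items : List Int) :
    ∀ (c : Int) (nl : List String), ¬ name ∈ nl →
      (items.foldl (pvStepA num price name) (c, nl)).2 =
        if items ≠ [] ∧ pvCnt price items c ≥ num then nl ++ [name] else nl := by
  induction items with
  | nil => intro c nl _; simp
  | cons i rest ih =>
    intro c nl h
    set c' := if i ≥ price then c + 1 else c with hc'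
    have hcnt : pvCnt price (i :: rest) c = pvCnt price rest c' := by
      simp [pvCnt, List.foldl_cons, hc']
    rw [List.foldl_cons]
    have hstep : pvStepA num price name (c, nl) i =
        (c', if c' ≥ num then nl ++ [name] else nl) := by
      simp [pvStepA, hc', h]
    rw [hstep]
    by_cases hge : c' ≥ num
    · rw [if_pos hge]
      rw [pvInner_mem num price name rest c' (nl ++ [name]) (by simp)]
      rw [if_pos ⟨by simp, by rw [hcnt]; exact le_trans hge (pvCnt_mono price rest c')⟩]
    · rw [if_neg hge]
      rw [ih c' nl h]
      cases rest with
      | nil =>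
        have : ¬ pvCnt price [i] c ≥ num := by
          rw [hcnt]; simpa [pvCnt] using hge
        simp [this]
      | cons j t =>
        simp only [ne_eq, reduceCtorEq, not_false_eq_true, true_and, hcnt]

-- the outer loop produces exactly the names qualifying by A's count test
theorem pvOuter (num price : Int) (customers : List (String × List Int)) :
    ∀ nl : List String,
      (customers.map Prod.fst).Nodup →
      (∀ n ∈ customers.map Prod.fst, ¬ n ∈ nl) →
      customers.foldl (fun nl p => (p.2.foldl (pvStepA num price p.1) (0, nl)).2) nl =
        nl ++ (customers.filter (fun p =>
          !p.2.isEmpty && decide (pvCnt price p.2 0 ≥ num))).map Prod.fst := by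
  induction customers with
  | nil => intro nl _ _; simp
  | cons p rest ih =>
    intro nl hnd hdisj
    simp only [List.map_cons, List.nodup_cons] at hnd
    have hp : ¬ p.1 ∈ nl := hdisj p.1 (by simp)
    simp only [List.foldl_cons]
    rw [pvInner_char num price p.1 p.2 0 nl hp]
    by_cases hq : p.2 ≠ [] ∧ pvCnt price p.2 0 ≥ num
    · rw [if_pos hq]
      rw [ih (nl ++ [p.1]) hnd.2 ?_]
      · have : (!p.2.isEmpty && decide (pvCnt price p.2 0 ≥ num)) = true := by
          simp; exact ⟨hq.1, hq.2⟩
        simp [this]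
      · intro n hn
        simp only [List.mem_append, List.mem_singleton]
        rintro (h | h)
        · exact hdisj n (by simp [hn]) h
        · exact hnd.1 (h ▸ hn)
    · rw [if_neg hq]
      rw [ih nl hnd.2 (fun n hn => hdisj n (by simp [hn]))]
      have : (!p.2.isEmpty && decide (pvCnt price p.2 0 ≥ num)) = false := by
        rw [Decidable.not_and_iff_or_not] at hq
        rcases hq with h | h
        · simp at h; simp [h]
        · simp [h]
      simp [this]

-- on a descending-sorted list, count ≥ n+1 iff the (n+1)-th element passes the threshold
theorem pvCnt_iff_getElem (price : Int) (s : List Int)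
    (hs : s.Pairwise (fun a b => b ≤ a)) :
    ∀ n (hn : n < s.length),
      (n + 1 ≤ s.countP (fun i => decide (price ≤ i)) ↔ price ≤ s[n]) := by
  induction s with
  | nil => intro n hn; simp at hn
  | cons x t ih =>
    intro n hn
    rw [List.pairwise_cons] at hs
    have hzero : x < price → t.countP (fun i => decide (price ≤ i)) = 0 := by
      intro hx
      rw [List.countP_eq_zero]
      intro y hy
      simp only [decide_eq_true_eq, not_le]
      exact lt_of_le_of_lt (hs.1 y hy) hx
    cases n with
    | zero =>
      simp only [List.getElem_cons_zero, List.countP_cons]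
      by_cases hx : price ≤ x
      · simp [hx]
      · simp only [not_le] at hx
        simp [hzero hx, not_le.mpr hx]
    | succ m =>
      simp only [List.length_cons, Nat.succ_lt_succ_iff] at hn
      simp only [List.getElem_cons_succ, List.countP_cons]
      by_cases hx : price ≤ x
      · simp only [hx, decide_true, if_true]
        rw [← ih hs.2 m hn]
        omega
      · simp only [not_le] at hx
        have ht : price ≤ t[m] ↔ False := by
          simp only [iff_false, not_le]
          exact lt_of_le_of_lt (hs.1 _ (List.getElem_mem hn)) hx
        simp [hzero hx, ht, not_le.mpr hx]

-- A's count test equals B's order-statistic test, given items ≠ [] when num ≤ 0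
theorem pvCond_eq (num price : Int) (items : List Int)
    (hne : num ≤ 0 → items ≠ []) :
    (!items.isEmpty && decide (pvCnt price items 0 ≥ num)) = pvQualifies num price items := by
  set s := PySem.List.sorted items (fun x => x) true with hsdef
  have hperm : s.Perm items := PySem.List.sorted_perm items (fun x => x) true
  have hlen : s.length = items.length := hperm.length_eq
  have hcntP : items.countP (fun i => decide (price ≤ i)) = s.countP (fun i => decide (price ≤ i)) :=
    (hperm.countP_eq _).symm
  have hcnt : pvCnt price items 0 = ((s.countP (fun i => decide (price ≤ i)) : Nat) : Int) := by
    rw [pvCnt_eq_countP, hcntP]; ring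
  by_cases hnum : num ≤ 0
  · have hne' := hne hnum
    have h1 : (!items.isEmpty) = true := by simp [hne']
    have h2 : decide (pvCnt price items 0 ≥ num) = true := by
      rw [hcnt]; simp only [ge_iff_le, decide_eq_true_eq]
      exact le_trans hnum (Int.natCast_nonneg _)
    simp [pvQualifies, h1, h2, hnum]
  · rw [not_le] at hnum
    have hnum0 : decide (num ≤ 0) = false := by simp; omega
    by_cases hlt : num ≤ (s.length : Int)
    · -- index num-1 is in range
      set n : Nat := (num - 1).toNat with hndef
      have hn : n < s.length := by omega
      have hidx : (num - 1) = ((n : Nat) : Int) := by omega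
      have hget : PySem.List.pyGet? s (num - 1) = some s[n] := by
        rw [hidx, PySem.List.pyGet?_natCast]
        exact List.getElem?_eq_getElem hn
      have hpair : s.Pairwise (fun a b => b ≤ a) := by
        simpa using PySem.List.sorted_pairwise_rev items (fun x => x)
      have hiff := pvCnt_iff_getElem price s hpair n hn
      have hnum_eq : (num : Int) = ((n : Nat) : Int) + 1 := by omega
      rw [pvQualifies]
      simp only [← hsdef]
      rw [hget, hnum0]
      simp only [Option.map_some, Option.getD_some, Bool.false_or]
      rw [show decide (num ≤ (s.length : Int)) = true by simp [hlt], Bool.true_and]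
      by_cases hpass : price ≤ s[n]
      · have hcount := hiff.mpr hpass
        have hc1 : decide (pvCnt price items 0 ≥ num) = true := by
          rw [hcnt]; simp only [ge_iff_le, decide_eq_true_eq]; omega
        have hne' : items ≠ [] := by
          intro h0
          have hl0 : s.length = 0 := by rw [hlen, h0]; rfl
          omega
        simp [hc1, hne', ge_iff_le, hpass]
      · have hc2 : ¬ (n + 1 ≤ s.countP (fun i => decide (price ≤ i))) :=
          fun h => hpass (hiff.mp h)
        have hc1 : decide (pvCnt price items 0 ≥ num) = false := by
          rw [hcnt]; simp only [ge_iff_le, decide_eq_false_iff_not, not_le]; omega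
        simp [hc1, ge_iff_le, hpass]
    · have hget : decide (num ≤ (s.length : Int)) = false := by simp [hlt]
      have hc : decide (pvCnt price items 0 ≥ num) = false := by
        rw [hcnt]; simp only [ge_iff_le, decide_eq_false_iff_not, not_le]
        have : (s.countP (fun i => decide (price ≤ i)) : Int) ≤ (s.length : Int) := by
          exact_mod_cast List.countP_le_length
        omega
      rw [pvQualifies]
      simp only [← hsdef]
      rw [hnum0, hget]
      simp [hc]

-- ===== VERDICT (by name: the statement is the Claim_ definition above) =====
theorem pizza_points_spec : Claim_equal_pizza_points := by
  intro customers num price _ hpre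
  unfold Spec_pizza_points pizza_points pizza_points_alt
  rw [pvOuter num price customers [] hpre.1 (by simp)]
  have hfc : customers.filter (fun p => !p.2.isEmpty && decide (pvCnt price p.2 0 ≥ num)) =
      customers.filter (fun p => pvQualifies num price p.2) :=
    List.filter_congr (fun p hp => pvCond_eq num price p.2 (fun hn => hpre.2 hn p hp))
  rw [hfc]
  simp
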